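-- pv_equiv track=rewrite | github.com/ChanHeeEEEEE/Coding_Test | 프로그래머스/lv0/120890. 가까운 수/가까운 수.py | solution
-- ===== SOURCE A (Python) =====
-- def solution(array, n):
--     a=[i-n for i in array]
--     b=[abs(i-n) for i in array]
--     near=min(b)
--     c=[]
--     for i in a:
--         if abs(i)==near:
--             c.append(i)
--     if len(c)==1:
--         return c[0]+n
--     else:
--         return min(c)+n
-- ===== SOURCE B (Python) =====
-- def solution(array, n):
--     return min(array, key=lambda x: (abs(x - n), x))
-- ===== Notes on version B (the rewrite author's own statement) =====
-- stated objective: idiomatic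
-- what changed: Replaces the three intermediate lists (signed diffs, abs diffs, filtered ties) and the length-1 branch with a single min over the array using the composite key (abs(x-n), x), which picks the closest element and breaks ties toward the smaller value in one pass.
import Mathlib
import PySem

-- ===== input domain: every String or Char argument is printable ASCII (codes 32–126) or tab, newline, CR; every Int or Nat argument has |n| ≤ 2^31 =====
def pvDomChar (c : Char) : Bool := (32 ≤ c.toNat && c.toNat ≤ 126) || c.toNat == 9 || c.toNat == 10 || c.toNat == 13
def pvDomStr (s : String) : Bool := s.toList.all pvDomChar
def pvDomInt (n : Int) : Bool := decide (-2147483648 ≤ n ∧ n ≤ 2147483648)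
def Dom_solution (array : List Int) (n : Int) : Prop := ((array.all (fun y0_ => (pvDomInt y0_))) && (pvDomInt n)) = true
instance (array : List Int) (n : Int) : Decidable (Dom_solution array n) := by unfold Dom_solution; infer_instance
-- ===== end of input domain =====

-- B replaces A's three intermediate lists and tie branch with one min over a composite key (idiomatic, single pass).

-- ===== PORT A =====
def solution (array : List Int) (n : Int) : Int :=
  let a := array.map (fun i => i - n)
  let b := array.map (fun i => |i - n|)
  let near := (PySem.List.min? b (fun x => x)).getD 0
  let c := a.foldl (fun c i => if |i| = near then c ++ [i] else c) []
  if c.length = 1 then (PySem.List.pyGet? c 0).getD 0 + n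
  else (PySem.List.min? c (fun x => x)).getD 0 + n

-- ===== PORT B =====
-- Python tuple key (abs(x-n), x); tuple comparison is lexicographic, written out here.
def keyB (n x : Int) : Int × Int := (|x - n|, x)

def lexLt (p q : Int × Int) : Bool := decide (p.1 < q.1 ∨ (p.1 = q.1 ∧ p.2 < q.2))

def solution_alt (array : List Int) (n : Int) : Int :=
  (array.foldl (fun acc x =>
      match acc with
      | none => some x
      | some m => if lexLt (keyB n x) (keyB n m) then some x else some m)
    none).getD 0

-- ===== PRECONDITION & SPEC =====
-- Pre_ excludes only the empty list, on which Python's min raises ValueError in both A and B.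
def Pre_solution (array : List Int) (n : Int) : Prop := array ≠ []
instance (array : List Int) (n : Int) : Decidable (Pre_solution array n) := by unfold Pre_solution; infer_instance
def pvWitness_solution : List Int × Int := ([3, 10, 28], 20)

def Spec_solution (array : List Int) (n : Int) (out : Int) : Prop := out = solution_alt array n
instance (array : List Int) (n : Int) (out : Int) : Decidable (Spec_solution array n out) := by unfold Spec_solution; infer_instance

-- ===== CLAIM (what is proved, stated in full; the proofs are below) =====
def Claim_equal_solution : Prop := ∀ (array : List Int) (n : Int), Dom_solution array n → Pre_solution array n → Spec_solution array n (solution array n)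

-- ===== LEMMAS AND PROOFS =====

-- lexicographic ≤ on the key pairs
def le2 (p q : Int × Int) : Prop := p.1 < q.1 ∨ (p.1 = q.1 ∧ p.2 ≤ q.2)

lemma le2_of_not_lt {p q : Int × Int} (h : ¬ lexLt p q = true) : le2 q p := by
  simp [lexLt] at h
  rcases lt_or_eq_of_le h.1 with h1 | h1
  · left; exact h1
  · right; exact ⟨h1, h.2 h1.symm⟩

lemma le2_of_lt {p q : Int × Int} (h : lexLt p q = true) : le2 p q := by
  simp [lexLt] at h
  rcases h with h | h
  · left; exact h
  · right; exact ⟨h.1, le_of_lt h.2⟩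

lemma le2_trans {p q r : Int × Int} (h1 : le2 p q) (h2 : le2 q r) : le2 p r := by
  rcases h1 with h1 | h1 <;> rcases h2 with h2 | h2
  · left; omega
  · left; omega
  · left; omega
  · right; exact ⟨h1.1.trans h2.1, h1.2.trans h2.2⟩

-- B's fold from a running minimum: result is a minimum of the start and the rest
lemma bfold_spec (n : Int) (xs : List Int) (m0 : Int) :
    ∃ m, xs.foldl (fun acc x =>
        match acc with
        | none => some x
        | some m => if lexLt (keyB n x) (keyB n m) then some x else some m)
      (some m0) = some m ∧ (m = m0 ∨ m ∈ xs) ∧ le2 (keyB n m) (keyB n m0) ∧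
      ∀ x ∈ xs, le2 (keyB n m) (keyB n x) := by
  induction xs generalizing m0 with
  | nil => exact ⟨m0, rfl, Or.inl rfl, Or.inr ⟨rfl, le_refl _⟩, by simp⟩
  | cons y ys ih =>
    simp only [List.foldl_cons]
    by_cases hl : lexLt (keyB n y) (keyB n m0) = true
    · rw [if_pos hl]
      obtain ⟨m, hf, hm, hle, hall⟩ := ih y
      refine ⟨m, hf, ?_, le2_trans hle (le2_of_lt hl), ?_⟩
      · rcases hm with h | h
        · exact Or.inr (h ▸ List.mem_cons_self)
        · exact Or.inr (List.mem_cons_of_mem _ h)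
      · intro x hx
        rcases List.mem_cons.mp hx with h | h
        · exact h ▸ hle
        · exact hall x h
    · rw [if_neg hl]
      obtain ⟨m, hf, hm, hle, hall⟩ := ih m0
      refine ⟨m, hf, ?_, hle, ?_⟩
      · rcases hm with h | h
        · exact Or.inl h
        · exact Or.inr (List.mem_cons_of_mem _ h)
      · intro x hx
        rcases List.mem_cons.mp hx with h | h
        · exact h ▸ le2_trans hle (le2_of_not_lt hl)
        · exact hall x h

-- min? over Ints with identity key, from a running minimum
lemma min?_from (xs : List Int) (m0 : Int) :
    ∃ m, xs.foldl (fun acc x =>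
        match acc with
        | none => some x
        | some m => if (x : Int) < m then some x else some m)
      (some m0) = some m ∧ (m = m0 ∨ m ∈ xs) ∧ m ≤ m0 ∧ ∀ x ∈ xs, m ≤ x := by
  induction xs generalizing m0 with
  | nil => exact ⟨m0, rfl, Or.inl rfl, le_refl _, by simp⟩
  | cons y ys ih =>
    simp only [List.foldl_cons]
    by_cases hl : y < m0
    · rw [if_pos hl]
      obtain ⟨m, hf, hm, hle, hall⟩ := ih y
      refine ⟨m, hf, ?_, hle.trans (le_of_lt hl), ?_⟩
      · rcases hm with h | h
        · exact Or.inr (h ▸ List.mem_cons_self)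
        · exact Or.inr (List.mem_cons_of_mem _ h)
      · intro x hx
        rcases List.mem_cons.mp hx with h | h
        · exact h ▸ hle
        · exact hall x h
    · rw [if_neg hl]
      obtain ⟨m, hf, hm, hle, hall⟩ := ih m0
      refine ⟨m, hf, ?_, hle, ?_⟩
      · rcases hm with h | h
        · exact Or.inl h
        · exact Or.inr (List.mem_cons_of_mem _ h)
      · intro x hx
        rcases List.mem_cons.mp hx with h | h
        · exact h ▸ hle.trans (not_lt.mp hl)
        · exact hall x h

lemma min?_spec (xs : List Int) (h : xs ≠ []) :
    ∃ m, PySem.List.min? xs (fun x => x) = some m ∧ m ∈ xs ∧ ∀ x ∈ xs, m ≤ x := by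
  cases xs with
  | nil => exact absurd rfl h
  | cons y ys =>
    obtain ⟨m, hf, hm, hle, hall⟩ := min?_from ys y
    refine ⟨m, ?_, ?_, ?_⟩
    · rw [show PySem.List.min? (y :: ys) (fun x => x)
            = ys.foldl (fun acc x => match acc with
                | none => some x
                | some m => if (x : Int) < m then some x else some m) (some y) by
          unfold PySem.List.min?
          simp only [List.foldl_cons]
          congr 1
          funext acc x
          cases acc <;> rfl]
      exact hf
    · rcases hm with h | h
      · exact h ▸ List.mem_cons_self
      · exact List.mem_cons_of_mem _ h
    · intro x hx
      rcases List.mem_cons.mp hx with h | h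
      · exact h ▸ hle
      · exact hall x h

lemma bfold_main (n : Int) (array : List Int) (h : array ≠ []) :
    ∃ m, solution_alt array n = m ∧ array.foldl (fun acc x =>
        match acc with
        | none => some x
        | some m => if lexLt (keyB n x) (keyB n m) then some x else some m)
      none = some m ∧ m ∈ array ∧ ∀ x ∈ array, le2 (keyB n m) (keyB n x) := by
  cases array with
  | nil => exact absurd rfl h
  | cons y ys =>
    obtain ⟨m, hf, hm, hle, hall⟩ := bfold_spec n ys y
    refine ⟨m, ?_, ?_, ?_, ?_⟩
    · simp [solution_alt, hf]
    · simpa using hf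
    · rcases hm with h | h
      · exact h ▸ List.mem_cons_self
      · exact List.mem_cons_of_mem _ h
    · intro x hx
      rcases List.mem_cons.mp hx with h | h
      · exact h ▸ hle
      · exact hall x h

-- ===== VERDICT (by name: the statement is the Claim_ definition above) =====
theorem solution_spec : Claim_equal_solution := by
  intro array n _ hpre
  simp only [Spec_solution, solution]
  obtain ⟨m, hmval, _, hmem, hall⟩ := bfold_main n array hpre
  -- near = |m - n|
  have hbne : array.map (fun i => |i - n|) ≠ [] := by
    simpa using hpre
  obtain ⟨nb, hnb, hnbmem, hnball⟩ := min?_spec _ hbne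
  have hnear : nb = |m - n| := by
    obtain ⟨x, hx, hxe⟩ := List.mem_map.mp hnbmem
    have h1 : nb ≤ |m - n| := hnball _ (List.mem_map.mpr ⟨m, hmem, rfl⟩)
    have h2 : |m - n| ≤ |x - n| := by
      rcases hall x hx with h | h
      · exact le_of_lt (by simpa [keyB] using h)
      · exact le_of_eq (by simpa [keyB] using h.1)
    omega
  -- c = filtered signed diffs
  have hc : (array.map (fun i => i - n)).foldl
      (fun c i => if |i| = nb then c ++ [i] else c) ([] : List Int)
      = ((array.map (fun i => i - n)).filter (fun i => |i| = nb)) := by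
    have := PySem.List.foldl_append_if (fun i : Int => decide (|i| = nb)) (fun i => i)
      (array.map (fun i => i - n)) []
    simpa [List.map_id] using this
  simp only [hnb, Option.getD_some]
  rw [hc]
  set c := (array.map (fun i => i - n)).filter (fun i => |i| = nb) with hcdef
  have hmc : m - n ∈ c := by
    refine List.mem_filter.mpr ⟨List.mem_map.mpr ⟨m, hmem, rfl⟩, by simp [hnear]⟩
  have hlow : ∀ i ∈ c, m - n ≤ i := by
    intro i hi
    obtain ⟨hia, hiabs⟩ := List.mem_filter.mp hi
    obtain ⟨x, hx, hxe⟩ := List.mem_map.mp hia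
    subst hxe
    have hxabs : |x - n| = |m - n| := by
      have h3 := of_decide_eq_true hiabs
      omega
    rcases hall x hx with h | h
    · exact absurd (by simpa [keyB] using h) (by omega)
    · have : m ≤ x := by simpa [keyB] using h.2
      omega
  by_cases h1 : c.length = 1
  · rw [if_pos h1]
    obtain ⟨v, hv⟩ := List.length_eq_one_iff.mp h1
    have : v = m - n := by
      have h2 := hmc; rw [hv] at h2; simp at h2; omega
    rw [hv, this]
    simp [PySem.List.pyGet?, PySem.List.pyIdx?, hmval]
  · rw [if_neg h1]
    have hcne : c ≠ [] := by
      intro he; rw [he] at hmc; exact absurd hmc (List.not_mem_nil)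
    obtain ⟨mc, hmcf, hmcmem, hmcall⟩ := min?_spec c hcne
    have : mc = m - n := le_antisymm (hmcall _ hmc) (hlow _ hmcmem)
    rw [hmcf]
    simp [this, hmval]
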